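-- pv_equiv track=rewrite | github.com/SAMRADDHASHRIVASTAVATECH/Solo-Exploration-Lab | cosmic extractor/cosmic_harvester.py | categorize_properties
-- ===== SOURCE A (Python) =====
-- from collections import OrderedDict, Counter, defaultdict
--
-- PROPERTY_CATEGORIES = OrderedDict([
--     ("Identity & General", ['name', 'type', 'class', 'locname', 'discoverytime']),
--     ("Hierarchy & System", ['parent', 'parentbody', 'parentstar', 'barycenter']),
--     ("Orbit & Motion", ['orbit', 'semimajoraxis', 'eccentricity', 'inclination', 'ascendingnode', 'argofpericenter', 'meananomaly', 'period', 'rotationperiod', 'obliquity']),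
--     ("Physical Properties", ['mass', 'radius', 'density', 'gravity', 'oblateness', 'age']),
--     ("Atmosphere", ['atmosphere', 'pressure', 'greenhouse', 'model', 'skycolor', 'composition']),
--     ("Clouds & Haze", ['cloud', 'haze', 'velocity', 'coverage']),
--     ("Surface & Terrain", ['surface', 'terrain', 'heightmap', 'crater', 'volcanism', 'tectonics', 'color']),
--     ("Hydrosphere & Oceans", ['ocean', 'liquid', 'sealevel', 'hydrosphere']),
--     ("Rings", ['ring', 'innerradius', 'outerradius', 'texture']),
--     ("Thermal & Climate", ['temperature', 'teff', 'climate', 'albedo']),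
--     ("Life & Habitability", ['life', 'organic', 'exotic', 'biome', 'habitability']),
--     ("Stellar Emissions", ['luminosity', 'spectrum', 'corona', 'chromosphere', 'flare']),
--     ("Galaxies & Nebulae", ['hubble', 'dimension', 'brightness', 'bulge', 'halo', 'arms']),
--     ("Rendering & Materials", ['material', 'rendering', 'texture', 'bump', 'specular', 'glow']),
--     ("Miscellaneous", [])
-- ])
--
-- def categorize_properties(fields: OrderedDict) -> OrderedDict:
--     grouped = OrderedDict((k, OrderedDict()) for k in PROPERTY_CATEGORIES.keys())
--     for k, v in fields.items():
--         k_lower = k.lower().replace('_', '')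
--         placed = False
--         for cat, keywords in PROPERTY_CATEGORIES.items():
--             if cat == "Miscellaneous": continue
--             if any(kw in k_lower for kw in keywords):
--                 grouped[cat][k] = v
--                 placed = True
--                 break
--         if not placed:
--             grouped["Miscellaneous"][k] = v
--
--     # Remove entirely empty categories
--     return OrderedDict((k, v) for k, v in grouped.items() if len(v) > 0)
-- ===== SOURCE B (Python) =====
-- from collections import OrderedDict
--
-- PROPERTY_CATEGORIES = OrderedDict([
--     ("Identity & General", ['name', 'type', 'class', 'locname', 'discoverytime']),
--     ("Hierarchy & System", ['parent', 'parentbody', 'parentstar', 'barycenter']),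
--     ("Orbit & Motion", ['orbit', 'semimajoraxis', 'eccentricity', 'inclination', 'ascendingnode', 'argofpericenter', 'meananomaly', 'period', 'rotationperiod', 'obliquity']),
--     ("Physical Properties", ['mass', 'radius', 'density', 'gravity', 'oblateness', 'age']),
--     ("Atmosphere", ['atmosphere', 'pressure', 'greenhouse', 'model', 'skycolor', 'composition']),
--     ("Clouds & Haze", ['cloud', 'haze', 'velocity', 'coverage']),
--     ("Surface & Terrain", ['surface', 'terrain', 'heightmap', 'crater', 'volcanism', 'tectonics', 'color']),
--     ("Hydrosphere & Oceans", ['ocean', 'liquid', 'sealevel', 'hydrosphere']),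
--     ("Rings", ['ring', 'innerradius', 'outerradius', 'texture']),
--     ("Thermal & Climate", ['temperature', 'teff', 'climate', 'albedo']),
--     ("Life & Habitability", ['life', 'organic', 'exotic', 'biome', 'habitability']),
--     ("Stellar Emissions", ['luminosity', 'spectrum', 'corona', 'chromosphere', 'flare']),
--     ("Galaxies & Nebulae", ['hubble', 'dimension', 'brightness', 'bulge', 'halo', 'arms']),
--     ("Rendering & Materials", ['material', 'rendering', 'texture', 'bump', 'specular', 'glow']),
--     ("Miscellaneous", [])
-- ])
--
-- # Precompiled flat lookup table: every keyword paired with the index of its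
-- # category.  The first category that matches a key is exactly the category
-- # of MINIMAL index among all matching keywords, so the nested first-match
-- # scan of the table collapses to a single min over this flat list.
-- CATEGORY_NAMES = list(PROPERTY_CATEGORIES.keys())
-- KEYWORD_TABLE = [(kw, i)
--                  for i, kws in enumerate(PROPERTY_CATEGORIES.values())
--                  for kw in kws]
-- MISC_INDEX = len(CATEGORY_NAMES) - 1
--
-- def categorize_properties(fields: OrderedDict) -> OrderedDict:
--     # Phase 1: decorate each field with its category index (min over the
--     # flat keyword table, Miscellaneous index when nothing matches).
--     dec = []
--     for k, v in fields.items():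
--         kl = k.lower().replace('_', '')
--         dec.append((min((i for kw, i in KEYWORD_TABLE if kw in kl),
--                         default=MISC_INDEX), k, v))
--     # Phase 2: one bucket per category index, in index order, skipping
--     # indices no field was decorated with.
--     out = OrderedDict()
--     for i in range(len(CATEGORY_NAMES)):
--         bucket = [(k, v) for j, k, v in dec if j == i]
--         if bucket:
--             out[CATEGORY_NAMES[i]] = OrderedDict(bucket)
--     return out
-- ===== Notes on version B (the rewrite author's own statement) =====
-- stated objective: alternative
-- what changed: B replaces A's per-field first-match scan of the nested category table by a precompiled flat (keyword, category-index) table: each field is decorated with the minimal matching index (first category wins = minimal index, Miscellaneous when none matches), then the output is built one bucket per category index in index order, skipping empty buckets.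
import Mathlib
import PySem

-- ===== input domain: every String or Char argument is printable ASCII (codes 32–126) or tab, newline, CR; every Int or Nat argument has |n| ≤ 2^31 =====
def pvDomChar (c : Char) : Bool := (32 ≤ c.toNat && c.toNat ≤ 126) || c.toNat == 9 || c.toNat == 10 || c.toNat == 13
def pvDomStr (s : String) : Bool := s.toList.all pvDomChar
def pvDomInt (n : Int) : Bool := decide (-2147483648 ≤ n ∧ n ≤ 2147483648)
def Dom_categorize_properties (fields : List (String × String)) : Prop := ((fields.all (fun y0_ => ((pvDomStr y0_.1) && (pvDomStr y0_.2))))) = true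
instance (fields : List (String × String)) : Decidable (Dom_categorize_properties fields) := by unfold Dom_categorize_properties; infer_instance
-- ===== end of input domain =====

-- B replaces A's per-field first-match scan of the category table by a precompiled flat
-- (keyword, category-index) table: each field is decorated with the MINIMAL matching index
-- (first category wins = minimal index), then one bucket per index is emitted in index
-- order; objective: alternative (same asymptotic cost, different algorithm/data structure).

-- ===== PORT A =====
-- the module constant PROPERTY_CATEGORIES, as A traverses it
def pvCats : List (String × List String) :=
  [ ("Identity & General", ["name", "type", "class", "locname", "discoverytime"]),
    ("Hierarchy & System", ["parent", "parentbody", "parentstar", "barycenter"]),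
    ("Orbit & Motion", ["orbit", "semimajoraxis", "eccentricity", "inclination", "ascendingnode", "argofpericenter", "meananomaly", "period", "rotationperiod", "obliquity"]),
    ("Physical Properties", ["mass", "radius", "density", "gravity", "oblateness", "age"]),
    ("Atmosphere", ["atmosphere", "pressure", "greenhouse", "model", "skycolor", "composition"]),
    ("Clouds & Haze", ["cloud", "haze", "velocity", "coverage"]),
    ("Surface & Terrain", ["surface", "terrain", "heightmap", "crater", "volcanism", "tectonics", "color"]),
    ("Hydrosphere & Oceans", ["ocean", "liquid", "sealevel", "hydrosphere"]),
    ("Rings", ["ring", "innerradius", "outerradius", "texture"]),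
    ("Thermal & Climate", ["temperature", "teff", "climate", "albedo"]),
    ("Life & Habitability", ["life", "organic", "exotic", "biome", "habitability"]),
    ("Stellar Emissions", ["luminosity", "spectrum", "corona", "chromosphere", "flare"]),
    ("Galaxies & Nebulae", ["hubble", "dimension", "brightness", "bulge", "halo", "arms"]),
    ("Rendering & Materials", ["material", "rendering", "texture", "bump", "specular", "glow"]),
    ("Miscellaneous", []) ]

-- k.lower().replace('_', '')
def pvNorm (k : String) : String := PySem.Str.replace (PySem.Str.lower k) "_" ""

-- any(kw in k_lower for kw in keywords)
def pvMatches (kws : List String) (kl : String) : Bool :=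
  kws.any (fun kw => PySem.Str.isIn kw kl)

-- A's inner 'for cat, keywords … break' loop with its 'placed' flag: first non-Miscellaneous
-- category whose keywords match (none = not placed).
def pvPlace : List (String × List String) → String → Option String
  | [], _ => none
  | (c, kws) :: cs, kl =>
    if c == "Miscellaneous" then pvPlace cs kl
    else if pvMatches kws kl then some c else pvPlace cs kl

-- the category a field key k ends up in ('placed' false => "Miscellaneous")
def pvAssign (k : String) : String :=
  (pvPlace pvCats (pvNorm k)).getD "Miscellaneous"

-- A: grouped = OrderedDict of per-category OrderedDicts, filled field by field, then the
-- empty categories are dropped. The inner OrderedDicts are represented by their association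
-- lists; 'grouped[cat][k] = v' appends, exact because Python's fields dict has distinct keys.
def categorize_properties (fields : List (String × String)) : List (String × List (String × String)) :=
  let g0 : PySem.Dict String (List (String × String)) :=
    pvCats.foldl (fun d ce => d.insert ce.1 []) PySem.Dict.empty
  let g := fields.foldl (fun d kv => d.modify (pvAssign kv.1) [] (fun inner => inner ++ [kv])) g0
  g.items.filter (fun p => decide (0 < p.2.length))

-- ===== PORT B =====
-- CATEGORY_NAMES
def pvCatNames : List String :=
  [ "Identity & General", "Hierarchy & System", "Orbit & Motion", "Physical Properties", "Atmosphere", "Clouds & Haze", "Surface & Terrain", "Hydrosphere & Oceans", "Rings", "Thermal & Climate", "Life & Habitability", "Stellar Emissions", "Galaxies & Nebulae", "Rendering & Materials", "Miscellaneous" ]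

-- KEYWORD_TABLE: the flat (keyword, category-index) pairs the module-level comprehension
-- of Source B evaluates to (written out as the literal list it produces)
def pvKwTable : List (String × Nat) :=
  [ ("name", 0), ("type", 0), ("class", 0), ("locname", 0), ("discoverytime", 0),
    ("parent", 1), ("parentbody", 1), ("parentstar", 1), ("barycenter", 1), ("orbit", 2),
    ("semimajoraxis", 2), ("eccentricity", 2), ("inclination", 2), ("ascendingnode", 2), ("argofpericenter", 2),
    ("meananomaly", 2), ("period", 2), ("rotationperiod", 2), ("obliquity", 2), ("mass", 3),
    ("radius", 3), ("density", 3), ("gravity", 3), ("oblateness", 3), ("age", 3),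
    ("atmosphere", 4), ("pressure", 4), ("greenhouse", 4), ("model", 4), ("skycolor", 4),
    ("composition", 4), ("cloud", 5), ("haze", 5), ("velocity", 5), ("coverage", 5),
    ("surface", 6), ("terrain", 6), ("heightmap", 6), ("crater", 6), ("volcanism", 6),
    ("tectonics", 6), ("color", 6), ("ocean", 7), ("liquid", 7), ("sealevel", 7),
    ("hydrosphere", 7), ("ring", 8), ("innerradius", 8), ("outerradius", 8), ("texture", 8),
    ("temperature", 9), ("teff", 9), ("climate", 9), ("albedo", 9), ("life", 10),
    ("organic", 10), ("exotic", 10), ("biome", 10), ("habitability", 10), ("luminosity", 11),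
    ("spectrum", 11), ("corona", 11), ("chromosphere", 11), ("flare", 11), ("hubble", 12),
    ("dimension", 12), ("brightness", 12), ("bulge", 12), ("halo", 12), ("arms", 12),
    ("material", 13), ("rendering", 13), ("texture", 13), ("bump", 13), ("specular", 13),
    ("glow", 13) ]

-- MISC_INDEX = len(CATEGORY_NAMES) - 1
def pvMiscIdx : Nat := pvCatNames.length - 1

-- one step of Python's min(...) over the generator '(i for kw, i in KEYWORD_TABLE if kw in kl)'
def pvMinStep (kl : String) (acc : Option Nat) (p : String × Nat) : Option Nat :=
  if PySem.Str.isIn p.1 kl then some (acc.elim p.2 (fun m => min m p.2)) else acc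

-- the category index a key k is decorated with: min over matching table entries, MISC default
def pvFieldIdx (k : String) : Nat :=
  (pvKwTable.foldl (pvMinStep (PySem.Str.replace (PySem.Str.lower k) "_" "")) none).getD pvMiscIdx

-- B: phase 1 decorates every field with its category index; phase 2 emits, for each index
-- in order, the bucket of fields decorated with it, skipping empty buckets.
-- 'CATEGORY_NAMES[i]' is ported as getD since i ranges over range(len(CATEGORY_NAMES)).
def categorize_properties_alt (fields : List (String × String)) : List (String × List (String × String)) :=
  let dec := fields.map (fun kv => (pvFieldIdx kv.1, kv.1, kv.2))
  (List.range pvCatNames.length).foldl (fun out i =>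
    let bucket := (dec.filter (fun d => d.1 == i)).map (fun d => (d.2.1, d.2.2))
    if bucket.isEmpty then out else out ++ [(pvCatNames.getD i "", bucket)]) []

-- ===== PRECONDITION & SPEC =====
def Spec_categorize_properties (fields : List (String × String)) (out : List (String × List (String × String))) : Prop := out = categorize_properties_alt fields
instance (fields : List (String × String)) (out : List (String × List (String × String))) : Decidable (Spec_categorize_properties fields out) := by unfold Spec_categorize_properties; infer_instance

-- ===== CLAIM =====
def Claim_equal_categorize_properties : Prop := ∀ (fields : List (String × String)), Dom_categorize_properties fields → Spec_categorize_properties fields (categorize_properties fields)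

-- ===== LEMMAS AND PROOFS =====

-- ---------- A-side characterisation (A = per-category filter over pvCats) ----------

def pvNames (cs : List (String × List String)) : List String :=
  (cs.filter (fun ce => ce.1 != "Miscellaneous")).map Prod.fst

lemma pvPlace_mem : ∀ (cs : List (String × List String)) (kl c : String),
    pvPlace cs kl = some c → c ∈ pvNames cs := by
  intro cs
  induction cs with
  | nil => intro kl c h; simp [pvPlace] at h
  | cons ce cs ih =>
    intro kl c h
    obtain ⟨c0, kws⟩ := ce
    by_cases h0 : c0 = "Miscellaneous"
    · subst h0
      simp [pvPlace] at h
      have := ih kl c h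
      simp [pvNames] at this ⊢
      tauto
    · simp [pvPlace, h0] at h
      by_cases hm : pvMatches kws kl = true
      · simp [hm] at h
        simp [pvNames, h0, ← h]
      · simp [hm] at h
        have := ih kl c h
        simp [pvNames, h0] at this ⊢
        tauto

lemma pvAssign_mem (k : String) : pvAssign k ∈ pvCats.map Prod.fst := by
  unfold pvAssign
  cases hp : pvPlace pvCats (pvNorm k) with
  | none => decide
  | some x =>
    have := pvPlace_mem pvCats (pvNorm k) x hp
    simp only [pvNames, List.mem_map, List.mem_filter] at this ⊢
    obtain ⟨ce, ⟨hce, _⟩, hx⟩ := this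
    exact ⟨ce, hce, hx⟩

lemma pv_g0_getD (l : List (String × List String)) (c : String) :
    (PySem.Dict.mk (l.map (fun ce => (ce.1, ([] : List (String × String)))))).getD c [] = [] := by
  induction l with
  | nil => rfl
  | cons ce l ih =>
    by_cases h : (ce.1 == c) = true
    · simp [PySem.Dict.getD_eq_get?_getD, PySem.Dict.get?_mk_cons, h]
    · rw [List.map_cons, PySem.Dict.getD_eq_get?_getD, PySem.Dict.get?_mk_cons, if_neg h,
        ← PySem.Dict.getD_eq_get?_getD]
      exact ih

lemma pv_map_filter (names : List String) (F : String → List (String × String)) :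
    ((names.map (fun c => (c, F c))).filter (fun p => decide (0 < p.2.length)))
    = names.filterMap (fun c => if (F c).isEmpty then none else some (c, F c)) := by
  induction names with
  | nil => rfl
  | cons n ns ih =>
    rw [List.map_cons, List.filter_cons, List.filterMap_cons]
    cases h : F n <;> simp [ih]

lemma pvA_char (fields : List (String × String)) :
    categorize_properties fields =
      pvCats.filterMap (fun ce =>
        if (fields.filter (fun p => pvAssign p.1 == ce.1)).isEmpty then none
        else some (ce.1, fields.filter (fun p => pvAssign p.1 == ce.1))) := by
  have hdef : categorize_properties fields
      = (fields.foldl (fun d kv => d.modify (pvAssign kv.1) [] (fun inner => inner ++ [kv]))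
          (pvCats.foldl (fun d ce => d.insert ce.1 ([] : List (String × String))) PySem.Dict.empty)).items.filter
          (fun p => decide (0 < p.2.length)) := rfl
  rw [hdef]
  have hg0 : (pvCats.foldl (fun d ce => d.insert ce.1 ([] : List (String × String))) PySem.Dict.empty)
      = PySem.Dict.mk (pvCats.map (fun ce => (ce.1, []))) := by decide
  rw [hg0]
  have hkeys : (fields.foldl (fun d kv => d.modify (pvAssign kv.1) []
        (fun inner => inner ++ [kv])) (PySem.Dict.mk (pvCats.map (fun ce => (ce.1, []))))).keys
      = pvCats.map Prod.fst := by
    rw [PySem.Dict.keys_foldl_modify_key fields (fun kv => pvAssign kv.1) []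
      (fun _ kv inner => inner ++ [kv]), PySem.Set.update_eq_append_filter]
    have hnil : (PySem.Set.ofList (fields.map (fun kv => pvAssign kv.1))).filter
        (fun y => !PySem.Set.contains
          (PySem.Dict.keys (PySem.Dict.mk (pvCats.map (fun ce =>
            (ce.1, ([] : List (String × String))))))) y) = [] := by
      rw [List.filter_eq_nil_iff]
      intro y hy
      rw [PySem.Set.mem_ofList, List.mem_map] at hy
      obtain ⟨kv, _, hkv⟩ := hy
      have hmem : y ∈ pvCats.map Prod.fst := hkv ▸ pvAssign_mem kv.1
      simp only [PySem.Dict.keys_mk, List.map_map, PySem.Set.contains_eq_listContains,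
        Bool.not_eq_true', Bool.not_eq_false]
      simpa [Function.comp_def] using hmem
    rw [hnil, List.append_nil, PySem.Dict.keys_mk, List.map_map]
    rfl
  have hget : ∀ c, (fields.foldl (fun d kv => d.modify (pvAssign kv.1) []
        (fun inner => inner ++ [kv])) (PySem.Dict.mk (pvCats.map (fun ce => (ce.1, []))))).getD c []
      = fields.filter (fun p => pvAssign p.1 == c) := by
    intro c
    have hmap : fields.foldl (fun d kv => d.modify (pvAssign kv.1) [] (fun inner => inner ++ [kv]))
          (PySem.Dict.mk (pvCats.map (fun ce => (ce.1, []))))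
        = (fields.map (fun kv => (pvAssign kv.1, kv))).foldl
            (fun d p => d.modify p.1 [] (fun inner => inner ++ [p.2]))
            (PySem.Dict.mk (pvCats.map (fun ce => (ce.1, [])))) := by rw [List.foldl_map]
    rw [hmap, PySem.Dict.getD_foldl_modify_append, pv_g0_getD, List.nil_append,
      List.filter_map, List.map_map]
    simp [Function.comp_def]
  have hnd : (fields.foldl (fun d kv => d.modify (pvAssign kv.1) []
        (fun inner => inner ++ [kv])) (PySem.Dict.mk (pvCats.map (fun ce => (ce.1, []))))).keys.Nodup := by
    rw [hkeys]; decide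
  rw [PySem.Dict.items_eq_map_keys _ hnd [], hkeys]
  simp only [hget]
  rw [pv_map_filter, List.filterMap_map]
  rfl

-- ---------- B-side: the flat-table min equals A's first-match ----------

-- the flat table of a category list, starting at index j (the comprehension of Source B)
def pvFlat : Nat → List (String × List String) → List (String × Nat)
  | _, [] => []
  | j, (_, kws) :: cs => kws.map (fun kw => (kw, j)) ++ pvFlat (j + 1) cs

-- first matching category index, starting at j (Miscellaneous never matches: no keywords)
def pvFirst : List (String × List String) → Nat → String → Option Nat
  | [], _, _ => none
  | (_, kws) :: cs, j, kl => if pvMatches kws kl then some j else pvFirst cs (j + 1) kl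

lemma pvMin_cat (kws : List String) (kl : String) (j : Nat) :
    ∀ acc, (kws.map (fun kw => (kw, j))).foldl (pvMinStep kl) acc
      = if pvMatches kws kl then some (acc.elim j (fun m => min m j)) else acc := by
  induction kws with
  | nil => intro acc; simp [pvMatches]
  | cons kw kws ih =>
    intro acc
    rw [List.map_cons, List.foldl_cons]
    by_cases hk : PySem.Str.isIn kw kl = true
    · have hstep : pvMinStep kl acc (kw, j) = some (acc.elim j (fun m => min m j)) := by
        simp only [pvMinStep, hk, if_true]
      have hm : pvMatches (kw :: kws) kl = true := by
        simp only [pvMatches, List.any_cons, hk, Bool.true_or]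
      rw [hstep, ih, hm, if_pos rfl]
      by_cases hm2 : pvMatches kws kl = true
      · rw [if_pos hm2]
        cases acc with
        | none => simp
        | some m => simp
      · rw [if_neg hm2]
    · have hk' : PySem.Str.isIn kw kl = false := by simpa using hk
      have hm : pvMatches (kw :: kws) kl = pvMatches kws kl := by
        simp only [pvMatches, List.any_cons, hk', Bool.false_or]
      have hstep : pvMinStep kl acc (kw, j) = acc := by
        simp only [pvMinStep, hk', Bool.false_eq_true, if_false]
      rw [hstep, hm, ih]

lemma pvMin_flat : ∀ (cs : List (String × List String)) (j : Nat) (kl : String) (acc : Option Nat),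
    (∀ m, acc = some m → m ≤ j) →
    (pvFlat j cs).foldl (pvMinStep kl) acc = acc.or (pvFirst cs j kl) := by
  intro cs
  induction cs with
  | nil => intro j kl acc _; cases acc <;> simp [pvFlat, pvFirst, Option.or]
  | cons ce cs ih =>
    intro j kl acc hacc
    obtain ⟨c, kws⟩ := ce
    rw [show pvFlat j ((c, kws) :: cs) = kws.map (fun kw => (kw, j)) ++ pvFlat (j + 1) cs from rfl,
      List.foldl_append, pvMin_cat]
    by_cases hm : pvMatches kws kl = true
    · rw [if_pos hm]
      cases acc with
      | none =>
        rw [show (none : Option Nat).elim j (fun m => min m j) = j from rfl,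
          ih (j + 1) kl (some j) (by intro m hm2; injection hm2 with h; omega)]
        simp [pvFirst, hm, Option.or]
      | some m =>
        have hmj : m ≤ j := hacc m rfl
        rw [show (some m : Option Nat).elim j (fun m => min m j) = min m j from rfl,
          show min m j = m from by omega,
          ih (j + 1) kl (some m) (by intro m' hm2; injection hm2 with h; omega)]
        simp [Option.or]
    · rw [if_neg hm]
      rw [ih (j + 1) kl acc (by intro m hm2; have := hacc m hm2; omega)]
      have hfb : pvMatches kws kl = false := by simpa using hm
      cases acc <;> simp [pvFirst, hfb, Option.or]

lemma pvFirst_lt : ∀ (cs : List (String × List String)) (j : Nat) (kl : String) (i : Nat),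
    pvFirst cs j kl = some i → j ≤ i ∧ i < j + cs.length := by
  intro cs
  induction cs with
  | nil => intro j kl i h; simp [pvFirst] at h
  | cons ce cs ih =>
    intro j kl i h
    obtain ⟨c, kws⟩ := ce
    by_cases hm : pvMatches kws kl = true
    · simp only [pvFirst, hm, if_true, Option.some.injEq] at h
      simp only [List.length_cons]
      omega
    · have hfb : pvMatches kws kl = false := by simpa using hm
      simp only [pvFirst, hfb, Bool.false_eq_true, if_false] at h
      have := ih (j + 1) kl i h
      simp only [List.length_cons]
      omega

-- pvPlace names the category pvFirst indexes
lemma pvPlace_first : ∀ (cs : List (String × List String)) (j : Nat) (kl : String),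
    (∀ ce ∈ cs, ce.1 = "Miscellaneous" → pvMatches ce.2 kl = false) →
    (∀ idx, pvCatNames.getD (j + idx) "" = (cs.map Prod.fst).getD idx "") →
    (pvPlace cs kl).getD "Miscellaneous" = pvCatNames.getD ((pvFirst cs j kl).getD pvMiscIdx) "" := by
  intro cs
  induction cs with
  | nil => intro j kl _ _; simp [pvPlace, pvFirst]; decide
  | cons ce cs ih =>
    intro j kl hmisc hn
    obtain ⟨c, kws⟩ := ce
    have hn' : ∀ idx, pvCatNames.getD (j + 1 + idx) "" = (cs.map Prod.fst).getD idx "" := by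
      intro idx
      have := hn (idx + 1)
      simpa [Nat.add_assoc, Nat.add_comm 1 idx] using this
    have hmisc' : ∀ ce ∈ cs, ce.1 = "Miscellaneous" → pvMatches ce.2 kl = false := by
      intro ce hce; exact hmisc ce (List.mem_cons_of_mem _ hce)
    by_cases hm : pvMatches kws kl = true
    · have hc : c ≠ "Miscellaneous" := by
        intro h
        have := hmisc (c, kws) List.mem_cons_self h
        rw [hm] at this; exact Bool.true_eq_false.mp this
      have h0 := hn 0
      simp only [List.map_cons, List.getD_cons_zero, Nat.add_zero] at h0
      have hplace : pvPlace ((c, kws) :: cs) kl = some c := by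
        simp [pvPlace, hc, hm]
      have hfirst : pvFirst ((c, kws) :: cs) j kl = some j := by
        simp [pvFirst, hm]
      rw [hplace, hfirst, Option.getD_some, Option.getD_some, h0]
    · have hfb : pvMatches kws kl = false := by simpa using hm
      by_cases hc : c = "Miscellaneous"
      · simp only [pvPlace, pvFirst, hc, BEq.rfl, if_true, hfb, Bool.false_eq_true, if_false]
        exact ih (j + 1) kl hmisc' hn'
      · simp only [pvPlace, pvFirst, beq_iff_eq, hc, if_false, hfb, Bool.false_eq_true]
        exact ih (j + 1) kl hmisc' hn'

-- KEYWORD_TABLE is the flat table of PROPERTY_CATEGORIES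
set_option maxHeartbeats 2000000 in
lemma pvKwTable_eq_flat : pvKwTable = pvFlat 0 pvCats := rfl

-- the B-side decorated index, characterised as A's first-match position
set_option maxHeartbeats 400000 in
lemma pvFieldIdx_first (k : String) :
    pvFieldIdx k = (pvFirst pvCats 0 (pvNorm k)).getD pvMiscIdx := by
  have h := pvMin_flat pvCats 0 (pvNorm k) none (fun m h => by cases h)
  rw [Option.none_or] at h
  show (pvKwTable.foldl (pvMinStep (pvNorm k)) none).getD pvMiscIdx = _
  rw [pvKwTable_eq_flat, h]

-- the key bridge: A's assigned category name is B's assigned index, looked up in the names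
lemma pvAssign_eq_names (k : String) :
    pvAssign k = pvCatNames.getD (pvFieldIdx k) "" := by
  rw [pvFieldIdx_first]
  unfold pvAssign
  apply pvPlace_first pvCats 0 (pvNorm k)
  · intro ce hce hname
    have h2 : ce.2 = [] := by
      have hall : ∀ ce ∈ pvCats, ce.1 = "Miscellaneous" → ce.2 = [] := by decide
      exact hall ce hce hname
    rw [h2]
    rfl
  · intro idx
    rw [show pvCats.map Prod.fst = pvCatNames from rfl]
    simp

lemma pvFieldIdx_le (k : String) : pvFieldIdx k ≤ 14 := by
  rw [pvFieldIdx_first]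
  cases hf : pvFirst pvCats 0 (pvNorm k) with
  | none => rw [Option.getD_none]; decide
  | some i =>
    have := pvFirst_lt pvCats 0 (pvNorm k) i hf
    simp only [Option.getD_some]
    have hlen : pvCats.length = 15 := rfl
    omega

lemma pvNames_inj : ∀ i < 15, ∀ i' < 15,
    pvCatNames.getD i "" = pvCatNames.getD i' "" → i = i' := by decide

-- A's per-category membership test equals B's index test, category by category
lemma pvPred_eq (i : Nat) (hi : i < 15) (k : String) :
    (pvAssign k == pvCatNames.getD i "") = (pvFieldIdx k == i) := by
  rw [pvAssign_eq_names]
  by_cases h : pvFieldIdx k = i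
  · simp [h]
  · have hne : pvCatNames.getD (pvFieldIdx k) "" ≠ pvCatNames.getD i "" := by
      intro he
      exact h (pvNames_inj (pvFieldIdx k) (by have := pvFieldIdx_le k; omega) i hi he)
    rw [beq_eq_false_iff_ne.mpr hne, beq_eq_false_iff_ne.mpr h]

-- B's phase-2 loop is a filterMap over the index range
lemma pv_foldl_buckets {α β : Type} (l : List α) (p : α → Bool) (g : α → β) :
    ∀ acc : List β, l.foldl (fun out x => if p x then out else out ++ [g x]) acc
      = acc ++ l.filterMap (fun x => if p x then none else some (g x)) := by
  induction l with
  | nil => intro acc; simp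
  | cons x l ih =>
    intro acc
    rw [List.foldl_cons, List.filterMap_cons]
    by_cases h : p x = true
    · simp only [h, if_true, ih]
    · simp only [h, if_false, ih, Bool.false_eq_true]
      rw [List.append_assoc]
      rfl

-- ===== VERDICT =====
theorem categorize_properties_spec : Claim_equal_categorize_properties := by
  intro fields _
  unfold Spec_categorize_properties
  rw [pvA_char]
  show _ =
    (List.range pvCatNames.length).foldl (fun out i =>
      let bucket := ((fields.map (fun kv => (pvFieldIdx kv.1, kv.1, kv.2))).filter
        (fun d => d.1 == i)).map (fun d => (d.2.1, d.2.2))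
      if bucket.isEmpty then out else out ++ [(pvCatNames.getD i "", bucket)]) []
  rw [pv_foldl_buckets (List.range pvCatNames.length)
    (fun i => (((fields.map (fun kv => (pvFieldIdx kv.1, kv.1, kv.2))).filter
        (fun d => d.1 == i)).map (fun d => (d.2.1, d.2.2))).isEmpty)
    (fun i => (pvCatNames.getD i "",
      ((fields.map (fun kv => (pvFieldIdx kv.1, kv.1, kv.2))).filter
        (fun d => d.1 == i)).map (fun d => (d.2.1, d.2.2)))) []]
  rw [List.nil_append]
  have hbucket : ∀ i, ((fields.map (fun kv => (pvFieldIdx kv.1, kv.1, kv.2))).filter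
      (fun d => d.1 == i)).map (fun d => (d.2.1, d.2.2))
      = fields.filter (fun p => pvFieldIdx p.1 == i) := by
    intro i
    rw [List.filter_map, List.map_map]
    simp [Function.comp_def]
  have hcats : pvCats = (List.range pvCatNames.length).map
      (fun i => pvCats.getD i ("", [])) := by decide
  conv_lhs => rw [hcats]
  rw [List.filterMap_map]
  apply List.filterMap_congr
  intro i hi
  have hi15 : i < 15 := by simpa using List.mem_range.mp hi
  have hname : (pvCats.getD i ("", [])).1 = pvCatNames.getD i "" := by
    interval_cases i <;> rfl
  have hfilter : fields.filter (fun p => pvAssign p.1 == pvCatNames.getD i "")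
      = fields.filter (fun p => pvFieldIdx p.1 == i) := by
    apply List.filter_congr
    intro p _
    rw [pvPred_eq i hi15]
  simp only [Function.comp_def, hbucket, hname, hfilter]
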